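-- pv_equiv track=rewrite | github.com/ston3dg3/Embeded | helper.py | morse_signal_duration
-- ===== SOURCE A (Python) =====
-- def morse_signal_duration(input_str: str) -> int:
--     # Morse code binary representation from A-Z and 0-9
--     morsecode = [
--         "10111", "111010101", "11101011101", "1110101", "1", "101011101",
--         "111011101", "1010101", "101", "1011101110111", "111010111", "101110101",
--         "1110111", "11101", "11101110111", "10111011101", "1110111010111",
--         "1011101", "10101", "111", "1010111", "101010111", "101110111",
--         "11101010111", "1110101110111", "11101110101",  # A-Z (0–25)
--         "1110111011101110111", "10111011101110111", "101011101110111",  # 0–2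
--         "1010101110111", "10101010111", "101010101", "11101010101",      # 3–6
--         "1110111010101", "111011101110101", "11101110111011101"          # 7–9
--     ]
--
--     total_duration = 0
--
--     for word in input_str.upper().split():
--         for char in word:
--             if char.isalpha():
--                 index = ord(char) - ord('A')
--             elif char.isdigit():
--                 index = ord(char) - ord('0') + 26
--             else:
--                 continue  # Ignore non-alphanumeric characters
--
--             code = morsecode[index]
--             total_duration += len(code) * 100  # Each 0 or 1 is 100ms
--
--         # Add 700ms space after each word except the last
--         total_duration += 700
--
--     # Remove trailing 700ms if any word was processed
--     if total_duration >= 700: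
--         total_duration -= 700
--
--     return total_duration
-- ===== SOURCE B (Python) =====
-- # Morse code patterns for A-Z and 0-9.
-- _CODE = {
--     'A': "10111", 'B': "111010101", 'C': "11101011101", 'D': "1110101",
--     'E': "1", 'F': "101011101", 'G': "111011101", 'H': "1010101",
--     'I': "101", 'J': "1011101110111", 'K': "111010111", 'L': "101110101",
--     'M': "1110111", 'N': "11101", 'O': "11101110111", 'P': "10111011101",
--     'Q': "1110111010111", 'R': "1011101", 'S': "10101", 'T': "111",
--     'U': "1010111", 'V': "101010111", 'W': "101110111", 'X': "11101010111",
--     'Y': "1110101110111", 'Z': "11101110101",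
--     '0': "1110111011101110111", '1': "10111011101110111", '2': "101011101110111",
--     '3': "1010101110111", '4': "10101010111", '5': "101010101", '6': "11101010101",
--     '7': "1110111010101", '8': "111011101110101", '9': "11101110111011101",
-- }
--
--
-- def morse_signal_duration(input_str: str) -> int:
--     # Single streaming pass: no splitting into words.  A small state machine
--     # tracks word boundaries and charges the 700 ms inter-word gap at the
--     # start of every word after the first; each signal bit costs 100 ms.
--     total = 0
--     in_word = False
--     seen_word = False
--     for c in input_str:
--         if c.isspace():
--             in_word = False
--         else:
--             if not in_word:
--                 if seen_word:
--                     total += 700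
--                 in_word = True
--                 seen_word = True
--             total += 100 * len(_CODE.get(c.upper(), ''))
--     return total
-- ===== Notes on version B (the rewrite author's own statement) =====
-- stated objective: alternative
-- what changed: Replaces A's split-into-words with nested loops and the add-700-per-word-then-conditionally-subtract-700 trick by a single streaming state machine over the raw string that detects word boundaries itself and charges the 700 ms gap at the start of each word after the first.
import Mathlib
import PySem

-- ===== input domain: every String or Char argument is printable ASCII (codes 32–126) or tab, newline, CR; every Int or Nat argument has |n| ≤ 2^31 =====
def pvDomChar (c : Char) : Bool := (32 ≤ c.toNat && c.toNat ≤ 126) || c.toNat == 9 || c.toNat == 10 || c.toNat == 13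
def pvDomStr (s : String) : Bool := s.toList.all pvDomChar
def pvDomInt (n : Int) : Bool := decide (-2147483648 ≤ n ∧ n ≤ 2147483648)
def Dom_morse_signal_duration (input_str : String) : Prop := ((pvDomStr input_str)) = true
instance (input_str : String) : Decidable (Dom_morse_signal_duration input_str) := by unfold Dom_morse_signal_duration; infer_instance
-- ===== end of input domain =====

-- B replaces A's split-into-words nested loops and its +700-per-word/-700-at-the-end trick by a
-- single streaming state machine over the raw string that detects word boundaries itself and
-- charges the 700 ms gap at the start of each word after the first (objective: alternative).

-- ===== PORT A =====
-- A-side helper: the morsecode list literal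
def pvMorsecode : List String := [
  "10111", "111010101", "11101011101", "1110101", "1", "101011101",
  "111011101", "1010101", "101", "1011101110111", "111010111", "101110101",
  "1110111", "11101", "11101110111", "10111011101", "1110111010111",
  "1011101", "10101", "111", "1010111", "101010111", "101110111",
  "11101010111", "1110101110111", "11101110101",
  "1110111011101110111", "10111011101110111", "101011101110111",
  "1010101110111", "10101010111", "101010101", "11101010101",
  "1110111010101", "111011101110101", "11101110111011101"]

-- A's inner loop body: branch on isalpha/isdigit, else continue; then index the list.
-- (the index is always in range for the characters that reach the lookup on Dom; the
-- `.getD ""` only totalises the list access)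
def pvStepA (t : Int) (char : Char) : Int :=
  let index? : Option Int :=
    if PySem.Chars.isalpha char then some ((char.toNat : Int) - 65)
    else if PySem.Chars.isdigit char then some ((char.toNat : Int) - 48 + 26)
    else none  -- continue: ignore non-alphanumeric characters
  match index? with
  | none => t
  | some index =>
    let code := (PySem.List.pyGet? pvMorsecode index).getD ""
    t + PySem.Str.len code * 100

-- A's outer loop body: process a word's characters, then add the 700 ms word space
def pvWordA (total : Int) (word : String) : Int :=
  word.toList.foldl pvStepA total + 700

def morse_signal_duration (input_str : String) : Int :=
  let total_duration := (PySem.Str.split₀ (PySem.Str.upper input_str)).foldl pvWordA 0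
  if total_duration ≥ 700 then total_duration - 700 else total_duration

-- ===== PORT B =====
-- B-side helper: the char → code-string dict literal (_CODE in Source B)
def pvCode : PySem.Dict Char String := PySem.Dict.ofList [
  ('A', "10111"), ('B', "111010101"), ('C', "11101011101"), ('D', "1110101"),
  ('E', "1"), ('F', "101011101"), ('G', "111011101"), ('H', "1010101"),
  ('I', "101"), ('J', "1011101110111"), ('K', "111010111"), ('L', "101110101"),
  ('M', "1110111"), ('N', "11101"), ('O', "11101110111"), ('P', "10111011101"),
  ('Q', "1110111010111"), ('R', "1011101"), ('S', "10101"), ('T', "111"),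
  ('U', "1010111"), ('V', "101010111"), ('W', "101110111"), ('X', "11101010111"),
  ('Y', "1110101110111"), ('Z', "11101110101"),
  ('0', "1110111011101110111"), ('1', "10111011101110111"), ('2', "101011101110111"),
  ('3', "1010101110111"), ('4', "10101010111"), ('5', "101010101"), ('6', "11101010101"),
  ('7', "1110111010101"), ('8', "111011101110101"), ('9', "11101110111011101")]

-- B's loop body: state (total, in_word, seen_word).  c.isspace() / c.upper() on a single
-- character are ported by PySem.Chars.isspace / upperChar (exact on the ASCII domain).
def pvStepB (st : Int × Bool × Bool) (c : Char) : Int × Bool × Bool :=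
  if PySem.Chars.isspace c then (st.1, false, st.2.2)
  else
    let total := if st.2.1 then st.1 else if st.2.2 then st.1 + 700 else st.1
    (total + 100 * PySem.Str.len (PySem.Dict.getD pvCode (PySem.Chars.upperChar c) ""),
     true, true)

def morse_signal_duration_alt (input_str : String) : Int :=
  (input_str.toList.foldl pvStepB (0, false, false)).1

-- ===== PRECONDITION & SPEC =====
def Spec_morse_signal_duration (input_str : String) (out : Int) : Prop := out = morse_signal_duration_alt input_str
instance (input_str : String) (out : Int) : Decidable (Spec_morse_signal_duration input_str out) := by unfold Spec_morse_signal_duration; infer_instance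

-- ===== CLAIM =====
def Claim_equal_morse_signal_duration : Prop := ∀ (input_str : String), Dom_morse_signal_duration input_str → Spec_morse_signal_duration input_str (morse_signal_duration input_str)

-- ===== LEMMAS AND PROOFS =====

-- A's per-character contribution (pvStepA t c = t + pvFA c)
def pvFA (char : Char) : Int :=
  let index? : Option Int :=
    if PySem.Chars.isalpha char then some ((char.toNat : Int) - 65)
    else if PySem.Chars.isdigit char then some ((char.toNat : Int) - 48 + 26)
    else none
  match index? with
  | none => 0
  | some index =>
    let code := (PySem.List.pyGet? pvMorsecode index).getD ""
    PySem.Str.len code * 100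

-- B's per-character contribution
def pvFB (c : Char) : Int := 100 * PySem.Str.len (PySem.Dict.getD pvCode (PySem.Chars.upperChar c) "")

-- number of maximal non-space runs of cs, given whether we are currently inside a word
def pvW (cs : List Char) (inw : Bool) : Nat :=
  match cs with
  | [] => 0
  | c :: rest =>
    if PySem.Chars.isspace c then pvW rest false
    else (if inw then 0 else 1) + pvW rest true

-- sum of g over the non-space characters of cs
def pvS (g : Char → Int) (cs : List Char) : Int :=
  ((cs.filter (fun c => !PySem.Chars.isspace c)).map g).sum

lemma pvStepA_eq (t : Int) (c : Char) : pvStepA t c = t + pvFA c := by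
  unfold pvStepA pvFA
  by_cases h1 : PySem.Chars.isalpha c <;> by_cases h2 : PySem.Chars.isdigit c <;>
    simp [h1, h2]

lemma pvInnerA (l : List Char) (t : Int) :
    l.foldl pvStepA t = t + (l.map pvFA).sum := by
  induction l generalizing t with
  | nil => simp
  | cons c l ih => simp [List.foldl, pvStepA_eq, ih]; ring

lemma pvOuterA (ws : List String) (t : Int) :
    ws.foldl pvWordA t
      = t + (ws.map (fun w => (w.toList.map pvFA).sum)).sum + 700 * ws.length := by
  induction ws generalizing t with
  | nil => simp
  | cons w ws ih => simp [List.foldl, pvWordA, pvInnerA, ih]; ring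

-- the words produced by split₀.go: their count …
lemma pvGoLen : ∀ (cs cur : List Char) (acc : List (List Char)),
    (PySem.Chars.split₀.go cs cur acc).length
      = acc.length + (if cur.isEmpty then pvW cs false else 1 + pvW cs true) := by
  intro cs
  induction cs with
  | nil =>
    intro cur acc
    simp only [PySem.Chars.split₀.go, pvW]
    split <;> simp
  | cons c rest ih =>
    intro cur acc
    simp only [PySem.Chars.split₀.go, pvW]
    by_cases hs : PySem.Chars.isspace c
    · by_cases hc : cur.isEmpty <;> simp [hs, hc, ih, Nat.add_assoc]
    · by_cases hc : cur.isEmpty <;> simp [hs, hc, ih]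

-- … and the sum of any per-character g over them
lemma pvGoSum (g : Char → Int) : ∀ (cs cur : List Char) (acc : List (List Char)),
    ((PySem.Chars.split₀.go cs cur acc).map (fun l => (l.map g).sum)).sum
      = (acc.map (fun l => (l.map g).sum)).sum + (cur.map g).sum + pvS g cs := by
  intro cs
  induction cs with
  | nil =>
    intro cur acc
    simp only [PySem.Chars.split₀.go, pvS]
    split <;> rename_i hc
    · simp [List.isEmpty_iff.mp hc]
    · simp
  | cons c rest ih =>
    intro cs acc
    simp only [PySem.Chars.split₀.go]
    by_cases hs : PySem.Chars.isspace c
    · by_cases hc : cs.isEmpty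
      · simp [hs, ih, pvS, List.isEmpty_iff.mp hc]
      · simp [hs, hc, ih, pvS]; ring
    · simp [hs, ih, pvS]; ring

lemma pvStepB_space (st : Int × Bool × Bool) (c : Char) (hs : PySem.Chars.isspace c = true) :
    pvStepB st c = (st.1, false, st.2.2) := by
  simp only [pvStepB, hs, if_true]

lemma pvStepB_char (t : Int) (inw seen : Bool) (c : Char)
    (hs : ¬ PySem.Chars.isspace c = true) :
    pvStepB (t, inw, seen) c
      = ((if inw then t else if seen then t + 700 else t) + pvFB c, true, true) := by
  simp only [pvStepB, hs, Bool.false_eq_true, if_false, pvFB]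

-- B's state machine: once a word has been seen, every later word costs exactly 700 up front
lemma pvFoldB_seen : ∀ (cs : List Char) (t : Int) (inw : Bool),
    (cs.foldl pvStepB (t, inw, true)).1 = t + pvS pvFB cs + 700 * pvW cs inw := by
  intro cs
  induction cs with
  | nil => simp [pvS, pvW]
  | cons c rest ih =>
    intro t inw
    by_cases hs : PySem.Chars.isspace c
    · rw [List.foldl_cons, pvStepB_space _ _ hs]
      simp only [ih, pvS, pvW, hs, List.filter_cons, Bool.not_true, if_true]
      simp
    · rw [List.foldl_cons, pvStepB_char _ _ _ _ hs, ih]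
      cases inw <;> simp [pvS, pvW, hs] <;> ring

-- B's state machine from the initial state
lemma pvFoldB_init : ∀ (cs : List Char) (t : Int),
    (cs.foldl pvStepB (t, false, false)).1
      = t + pvS pvFB cs + 700 * pvW cs false - (if pvW cs false = 0 then 0 else 700) := by
  intro cs
  induction cs with
  | nil => simp [pvS, pvW]
  | cons c rest ih =>
    intro t
    by_cases hs : PySem.Chars.isspace c
    · rw [List.foldl_cons, pvStepB_space _ _ hs]
      simp only [ih, pvS, pvW, hs, List.filter_cons, Bool.not_true, if_true]
      simp
    · rw [List.foldl_cons, pvStepB_char _ _ _ _ hs, pvFoldB_seen]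
      simp [pvS, pvW, hs]
      ring

-- if there is no word, every character is a space, so the non-space char sum vanishes
lemma pvW_zero (g : Char → Int) : ∀ (cs : List Char), pvW cs false = 0 → pvS g cs = 0 := by
  intro cs
  induction cs with
  | nil => intro _; simp [pvS]
  | cons c rest ih =>
    intro h
    by_cases hs : PySem.Chars.isspace c
    · simp only [pvW, hs, if_true] at h
      simpa [pvS, hs] using ih h
    · simp [pvW, hs] at h

-- pointwise facts on domain characters: upper-casing keeps spaces spaces, A's table-indexed
-- contribution on the upper-cased character equals B's dict contribution, and it is nonnegative
set_option maxRecDepth 20000 in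
set_option maxHeartbeats 2000000 in
lemma pvKey : ∀ n : Nat, n < 128 → pvDomChar (Char.ofNat n) = true →
    (PySem.Chars.isspace (PySem.Chars.upperChar (Char.ofNat n)) = PySem.Chars.isspace (Char.ofNat n))
    ∧ pvFA (PySem.Chars.upperChar (Char.ofNat n)) = pvFB (Char.ofNat n)
    ∧ 0 ≤ pvFB (Char.ofNat n) := by
  decide

lemma pvKey' (c : Char) (h : pvDomChar c = true) :
    (PySem.Chars.isspace (PySem.Chars.upperChar c) = PySem.Chars.isspace c)
    ∧ pvFA (PySem.Chars.upperChar c) = pvFB c ∧ 0 ≤ pvFB c := by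
  have hlt : c.toNat < 128 := by simp [pvDomChar] at h; omega
  have hofNat : Char.ofNat c.toNat = c := Char.ofNat_toNat c
  have := pvKey c.toNat hlt (by rwa [hofNat])
  rwa [hofNat] at this

-- upper-casing does not change the word count …
lemma pvW_upper : ∀ (cs : List Char) (inw : Bool), (∀ c ∈ cs, pvDomChar c = true) →
    pvW (PySem.Chars.upper cs) inw = pvW cs inw := by
  intro cs
  induction cs with
  | nil => intro _ _; simp [PySem.Chars.upper, pvW]
  | cons c rest ih =>
    intro inw hdom
    have hc := (pvKey' c (hdom c (by simp))).1
    have hrest : ∀ c ∈ rest, pvDomChar c = true := fun c hc => hdom c (by simp [hc])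
    simp only [PySem.Chars.upper, List.map_cons, pvW, hc]
    by_cases hs : PySem.Chars.isspace c <;>
      simp [hs] <;> simpa [PySem.Chars.upper] using ih _ hrest

-- … and A's char sum over the upper-cased string is B's char sum over the raw string
lemma pvS_upper : ∀ (cs : List Char), (∀ c ∈ cs, pvDomChar c = true) →
    pvS pvFA (PySem.Chars.upper cs) = pvS pvFB cs := by
  intro cs
  induction cs with
  | nil => intro _; simp [PySem.Chars.upper, pvS]
  | cons c rest ih =>
    intro hdom
    have hc := pvKey' c (hdom c (by simp))
    have hrest : ∀ c ∈ rest, pvDomChar c = true := fun c hc => hdom c (by simp [hc])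
    simp only [PySem.Chars.upper, List.map_cons, pvS, List.filter_cons, hc.1]
    by_cases hs : PySem.Chars.isspace c
    · simpa [pvS, hs] using ih hrest
    · simpa [pvS, hs, hc.2.1] using congrArg (fun x => pvFB c + x) (ih hrest)

-- B's char sums are nonnegative on the domain
lemma pvS_nonneg (cs : List Char) (hdom : ∀ c ∈ cs, pvDomChar c = true) :
    0 ≤ pvS pvFB cs := by
  apply List.sum_nonneg
  intro x hx
  rcases List.mem_map.mp hx with ⟨c, hc, rfl⟩
  exact (pvKey' c (hdom c (List.mem_of_mem_filter hc))).2.2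

-- ===== VERDICT =====
theorem morse_signal_duration_spec : Claim_equal_morse_signal_duration := by
  intro input_str hdom
  have hdom' : ∀ c ∈ input_str.toList, pvDomChar c = true := by
    unfold Dom_morse_signal_duration pvDomStr at hdom
    exact List.all_eq_true.mp hdom
  simp only [Spec_morse_signal_duration, morse_signal_duration, morse_signal_duration_alt]
  rw [pvOuterA, pvFoldB_init]
  have hsum : ((PySem.Str.split₀ (PySem.Str.upper input_str)).map
        (fun w => (w.toList.map pvFA).sum)).sum = pvS pvFB input_str.toList := by
    rw [PySem.Str.split₀, List.map_map]
    simp only [Function.comp_def, String.toList_ofList]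
    rw [PySem.Chars.split₀, pvGoSum, PySem.Str.toList_upper, pvS_upper _ hdom']
    simp
  have hlen : (PySem.Str.split₀ (PySem.Str.upper input_str)).length
      = pvW input_str.toList false := by
    rw [PySem.Str.split₀, List.length_map, PySem.Chars.split₀, pvGoLen,
      PySem.Str.toList_upper]
    simpa using pvW_upper input_str.toList false hdom'
  rw [hsum, hlen]
  have hnn := pvS_nonneg input_str.toList hdom'
  have hz := pvW_zero pvFB input_str.toList
  generalize hW : pvW input_str.toList false = W at hz ⊢
  generalize hS : pvS pvFB input_str.toList = S at hnn hz ⊢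
  rcases Nat.eq_zero_or_pos W with h0 | h1
  · subst h0; simp [hz rfl]
  · have hW1 : (1 : Int) ≤ (W : Int) := by exact_mod_cast h1
    split_ifs with ha hb hc <;> omega
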